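-- pv_equiv track=rewrite | github.com/zeynepgurler/CMPE561-Application-Project-1 | tokenizer/utils.py | build_text_and_boundaries_from_tokens
-- ===== SOURCE A (Python) =====
-- from typing import Set, Tuple, List
-- from typing import List, Set, Tuple
--
-- def build_text_and_boundaries_from_tokens(tokens: List[str]) -> Tuple[str, Set[int]]:
--     """
--     Reconstruct a raw text from gold tokens and compute the gold token boundaries.
--
--     Example:
--         tokens = ["Hello", ",", "world", "!"]
--         text = "Hello , world !"
--         boundaries = {5, 7, 13, 15}
--         (i.e., indices where a token ends in the reconstructed string)
--
--     For tokenization training, we deliberately use a simple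
--     "tokens + space" scheme so the mapping between characters
--     and token boundaries is deterministic and consistent across domains.
--     """
--     text_parts: List[str] = []
--     boundaries: Set[int] = set()
--     pos = 0
--
--     for i, tok in enumerate(tokens):
--         if i > 0:
--             text_parts.append(" ")
--             pos += 1  # space
--         text_parts.append(tok)
--         pos += len(tok)
--         boundaries.add(pos)  # token ends at this character index
--
--     text = "".join(text_parts)
--     return text, boundaries
-- ===== SOURCE B (Python) =====
-- from typing import List, Set, Tuple
--
--
-- def build_text_and_boundaries_from_tokens(tokens: List[str]) -> Tuple[str, Set[int]]:
--     # Counter-free, staged: the boundary after token i is simply the length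
--     # of the space-joined prefix tokens[:i+1]; the text is one join.
--     boundaries = {len(" ".join(tokens[:i + 1])) for i in range(len(tokens))}
--     return " ".join(tokens), boundaries
-- ===== Notes on version B (the rewrite author's own statement) =====
-- stated objective: alternative
-- what changed: B keeps no running position counter and no boundary-accumulation loop: each boundary is derived independently as len(" ".join(tokens[:i+1])) of the joined prefix, and the text by a single join; this trades A's one-pass counter for per-boundary prefix joins (quadratic in total length).
import Mathlib
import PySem

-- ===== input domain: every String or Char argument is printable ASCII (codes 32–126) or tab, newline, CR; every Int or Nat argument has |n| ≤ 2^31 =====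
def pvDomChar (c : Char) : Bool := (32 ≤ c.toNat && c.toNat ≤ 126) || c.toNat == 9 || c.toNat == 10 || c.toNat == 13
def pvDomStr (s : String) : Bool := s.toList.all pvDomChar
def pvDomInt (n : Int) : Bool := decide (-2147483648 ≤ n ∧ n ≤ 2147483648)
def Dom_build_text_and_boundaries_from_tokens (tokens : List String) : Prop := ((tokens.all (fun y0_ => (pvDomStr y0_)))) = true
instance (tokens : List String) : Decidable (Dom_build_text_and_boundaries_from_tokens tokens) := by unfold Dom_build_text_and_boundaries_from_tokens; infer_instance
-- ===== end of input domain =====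

-- B derives each boundary independently as the length of the space-joined prefix tokens[:i+1] (no counter, no accumulation loop); alternative decomposition, same results.

-- ===== PORT A =====
-- loop body of A: `if i > 0: parts.append(" "); pos += 1` then append tok, pos += len(tok), boundaries.add(pos)
def pvStepA (acc : List String × PySem.Set Int × Int) (p : Int × String) : List String × PySem.Set Int × Int :=
  let parts := if p.1 > 0 then acc.1 ++ [" "] else acc.1
  let pos := if p.1 > 0 then acc.2.2 + 1 else acc.2.2
  let parts := parts ++ [p.2]
  let pos := pos + PySem.Str.len p.2
  (parts, PySem.Set.add acc.2.1 pos, pos)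

def build_text_and_boundaries_from_tokens (tokens : List String) : String × List Int :=
  let st := (PySem.List.enumerate tokens 0).foldl pvStepA ([], PySem.Set.empty, 0)
  (PySem.Str.join "" st.1, st.2.1)

-- ===== PORT B =====
-- B: boundaries = {len(" ".join(tokens[:i+1])) for i in range(len(tokens))}; text = " ".join(tokens)
def build_text_and_boundaries_from_tokens_alt (tokens : List String) : String × List Int :=
  let ends := (PySem.List.pyRange 0 (tokens.length : Int) 1).map
    (fun i => PySem.Str.len (PySem.Str.join " " (PySem.List.slice tokens none (some (i + 1)))))
  (PySem.Str.join " " tokens, PySem.Set.ofList ends)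

-- ===== PRECONDITION & SPEC =====
def Spec_build_text_and_boundaries_from_tokens (tokens : List String) (out : String × List Int) : Prop := out = build_text_and_boundaries_from_tokens_alt tokens
instance (tokens : List String) (out : String × List Int) : Decidable (Spec_build_text_and_boundaries_from_tokens tokens out) := by unfold Spec_build_text_and_boundaries_from_tokens; infer_instance

-- ===== CLAIM (what is proved, stated in full; the proofs are below) =====
def Claim_equal_build_text_and_boundaries_from_tokens : Prop := ∀ (tokens : List String), Dom_build_text_and_boundaries_from_tokens tokens → Spec_build_text_and_boundaries_from_tokens tokens (build_text_and_boundaries_from_tokens tokens)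

-- ===== LEMMAS AND PROOFS =====

-- boundary list of tokens ts when the previous token ended at position pos (pos = -1 meaning "no previous character")
def pvBnds (pos : Int) : List String → List Int
  | [] => []
  | t :: r => (pos + 1 + PySem.Str.len t) :: pvBnds (pos + 1 + PySem.Str.len t) r

theorem pvLen_nonneg (s : String) : 0 ≤ PySem.Str.len s := by
  rw [PySem.Str.len_eq]; exact_mod_cast Nat.zero_le _

theorem pvBnds_gt (ts : List String) (pos : Int) : ∀ x ∈ pvBnds pos ts, pos < x := by
  induction ts generalizing pos with
  | nil => simp [pvBnds]
  | cons t r ih =>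
    intro x hx
    have hl := pvLen_nonneg t
    rcases List.mem_cons.mp hx with h | h
    · omega
    · have := ih (pos + 1 + PySem.Str.len t) x h
      omega

theorem pvBnds_pairwise (ts : List String) (pos : Int) : (pvBnds pos ts).Pairwise (· < ·) := by
  induction ts generalizing pos with
  | nil => simp [pvBnds]
  | cons t r ih =>
    refine List.pairwise_cons.mpr ⟨?_, ih _⟩
    exact pvBnds_gt r _

theorem pvBnds_nodup (ts : List String) (pos : Int) : (pvBnds pos ts).Nodup :=
  (pvBnds_pairwise ts pos).imp fun h => ne_of_lt h

theorem pvBnds_shift (ts : List String) (p c : Int) :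
    pvBnds (p + c) ts = (pvBnds p ts).map (· + c) := by
  induction ts generalizing p with
  | nil => simp [pvBnds]
  | cons t r ih =>
    simp only [pvBnds, List.map_cons]
    have h : p + c + 1 + PySem.Str.len t = p + 1 + PySem.Str.len t + c := by ring
    rw [h, ih]

theorem pvStepA_pos (parts : List String) (bset : PySem.Set Int) (pos s : Int) (t : String)
    (hs : 0 < s) :
    pvStepA (parts, bset, pos) (s, t)
    = (parts ++ [" "] ++ [t], PySem.Set.add bset (pos + 1 + PySem.Str.len t), pos + 1 + PySem.Str.len t) := by
  simp [pvStepA, hs]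

-- A's loop from index s ≥ 1 onwards
theorem pvLoopA (ts : List String) (s : Int) (hs : 1 ≤ s)
    (parts : List String) (bset : PySem.Set Int) (pos : Int)
    (hb : ∀ x ∈ bset, x ≤ pos) :
    (PySem.List.enumerate ts s).foldl pvStepA (parts, bset, pos)
    = (parts ++ ts.flatMap (fun t => [" ", t]),
       bset ++ pvBnds pos ts,
       pos + ((ts.map PySem.Str.len).sum + ts.length)) := by
  induction ts generalizing s parts bset pos with
  | nil => simp [PySem.List.enumerate_nil, pvBnds]
  | cons t r ih =>
    rw [PySem.List.enumerate_cons, List.foldl_cons, pvStepA_pos _ _ _ _ _ (by omega)]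
    have hl := pvLen_nonneg t
    have hlen : PySem.Str.len t = (t.toList.length : Int) := by rw [PySem.Str.len_eq]
    have hnot : pos + 1 + PySem.Str.len t ∉ bset := by
      intro h; have := hb _ h; omega
    rw [PySem.Set.add_of_not_mem hnot]
    rw [ih (s + 1) (by omega) _ _ _
      (by intro x hx
          rcases List.mem_append.mp hx with h | h
          · have := hb _ h; omega
          · rw [List.mem_singleton] at h; omega)]
    refine Prod.ext ?_ (Prod.ext ?_ ?_)
    · simp
    · simp [pvBnds]
    · simp only [List.length_cons, List.map_cons, List.sum_cons]
      push_cast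
      ring

-- length (as Int) of " ".join ts, on the string side
def pvJL (ts : List String) : Int := PySem.Str.len (PySem.Str.join " " ts)

theorem pvJL_cons (t : String) (ts : List String) (h : ts ≠ []) :
    pvJL (t :: ts) = PySem.Str.len t + 1 + pvJL ts := by
  obtain ⟨u, r, rfl⟩ : ∃ u r, ts = u :: r := by
    cases ts with
    | nil => exact absurd rfl h
    | cons u r => exact ⟨u, r, rfl⟩
  simp only [pvJL, PySem.Str.len_eq, PySem.Str.toList_join, List.map_cons,
    PySem.Chars.join_cons_cons]
  have h1 : (" " : String).toList = [' '] := rfl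
  simp [h1]
  ring

theorem pvJL_singleton (t : String) : pvJL [t] = PySem.Str.len t := by
  simp [pvJL, PySem.Str.len_eq, PySem.Str.toList_join, PySem.Chars.join_singleton]

-- B's boundary list: prefix-join lengths over range(len ts) equal pvBnds (-1) ts
theorem pvPrefixEq (ts : List String) :
    (List.range ts.length).map (fun k => pvJL (ts.take (k + 1))) = pvBnds (-1) ts := by
  induction ts with
  | nil => simp [pvBnds]
  | cons t r ih =>
    rw [List.length_cons, List.range_succ_eq_map, List.map_cons, List.map_map]
    have h0 : pvJL ((t :: r).take (0 + 1)) = PySem.Str.len t := by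
      simp [pvJL_singleton]
    rw [h0]
    have hmap : (List.range r.length).map ((fun k => pvJL ((t :: r).take (k + 1))) ∘ (· + 1))
        = (List.range r.length).map ((· + (PySem.Str.len t + 1)) ∘ (fun k => pvJL (r.take (k + 1)))) := by
      apply List.map_congr_left
      intro k hk
      rw [List.mem_range] at hk
      have hne : r.take (k + 1) ≠ [] := by
        cases r with
        | nil => simp at hk
        | cons u s => simp [List.take]
      simp only [Function.comp]
      rw [show (k + 1) + 1 = (k + 1) + 1 from rfl, List.take_succ_cons, pvJL_cons _ _ hne]
      ring
    rw [hmap, ← List.map_map, ih]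
    have hsh : pvBnds (PySem.Str.len t) r
        = (pvBnds (-1) r).map (· + (PySem.Str.len t + 1)) := by
      have := pvBnds_shift r (-1) (PySem.Str.len t + 1)
      rw [show (-1 : Int) + (PySem.Str.len t + 1) = PySem.Str.len t from by ring] at this
      exact this
    rw [← hsh]
    simp only [pvBnds]
    have : (-1 : Int) + 1 + PySem.Str.len t = PySem.Str.len t := by ring
    rw [this]

-- text: "".join of A's parts equals " ".join of the tokens (on char lists)
theorem pvTextEq (rest : List String) (t0cs : List Char) :
    PySem.Chars.join [] (t0cs :: (rest.flatMap (fun t => [" ", t])).map String.toList)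
    = PySem.Chars.join [' '] (t0cs :: rest.map String.toList) := by
  induction rest generalizing t0cs with
  | nil => simp
  | cons t1 r ih =>
    simp only [List.flatMap_cons, List.cons_append, List.nil_append, List.map_cons]
    rw [PySem.Chars.join_cons_cons, PySem.Chars.join_cons_cons,
      PySem.Chars.join_cons_cons, ih t1.toList]
    have h1 : (" " : String).toList = [' '] := rfl
    simp [h1]

-- ===== VERDICT (by name: the statement is the Claim_ definition above) =====
theorem build_text_and_boundaries_from_tokens_spec : Claim_equal_build_text_and_boundaries_from_tokens := by
  intro tokens _
  unfold Spec_build_text_and_boundaries_from_tokens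
  unfold build_text_and_boundaries_from_tokens build_text_and_boundaries_from_tokens_alt
  -- rewrite B's ends list into pvBnds (-1) tokens
  have hB : (PySem.List.pyRange 0 (tokens.length : Int) 1).map
      (fun i => PySem.Str.len (PySem.Str.join " " (PySem.List.slice tokens none (some (i + 1)))))
      = pvBnds (-1) tokens := by
    rw [PySem.List.pyRange_one, show ((tokens.length : Int) - 0).toNat = tokens.length from by omega,
      List.map_map]
    rw [← pvPrefixEq tokens]
    apply List.map_congr_left
    intro k hk
    simp only [Function.comp]
    have : PySem.List.slice tokens none (some ((0 : Int) + k + 1)) = tokens.take (k + 1) := by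
      rw [show (0 : Int) + (k : Int) + 1 = ((k + 1 : Nat) : Int) from by push_cast; ring,
        PySem.List.slice_to_natCast]
    rw [this]
    rfl
  cases tokens with
  | nil =>
    dsimp only
    rw [show (PySem.List.pyRange 0 ((List.length ([] : List String) : Int)) 1) = [] from by
      simp [PySem.List.pyRange_one_eq_nil]]
    rfl
  | cons t0 rest =>
    dsimp only
    rw [hB]
    rw [PySem.List.enumerate_cons, List.foldl_cons,
      show pvStepA ([], PySem.Set.empty, 0) ((0 : Int), t0)
          = ([t0], [PySem.Str.len t0], PySem.Str.len t0) from by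
        simp [pvStepA, PySem.Set.empty],
      show (0 : Int) + 1 = 1 from by norm_num,
      pvLoopA rest 1 (by omega) [t0] [PySem.Str.len t0] (PySem.Str.len t0)
        (by intro x hx; rw [List.mem_singleton] at hx; omega)]
    dsimp only
    have hbndlist : ([PySem.Str.len t0] ++ pvBnds (PySem.Str.len t0) rest : List Int)
        = pvBnds (-1) (t0 :: rest) := by
      simp only [pvBnds, List.singleton_append]
      have : (-1 : Int) + 1 + PySem.Str.len t0 = PySem.Str.len t0 := by ring
      rw [this]
    refine Prod.ext ?_ ?_
    · -- text component
      dsimp only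
      apply String.toList_inj.mp
      have hj : ∀ (sep : String) (ps : List String), (PySem.Str.join sep ps).toList
          = PySem.Chars.join sep.toList (ps.map String.toList) := by
        intro sep ps; simp [PySem.Str.toList_join]
      rw [hj, hj]
      have h0 : ("" : String).toList = [] := rfl
      have h1 : (" " : String).toList = [' '] := rfl
      simpa [h0, h1] using pvTextEq rest t0.toList
    · -- boundaries component
      dsimp only
      rw [hbndlist, PySem.Set.ofList_eq_self_of_nodup _ (pvBnds_nodup _ _)]
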